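-- pv_equiv track=rewrite | github.com/mCRL2org/mCRL2 | tools/release/pbessolvesymbolic/pbessolvesymbolic.py | compute_cost
-- ===== SOURCE A (Python) =====
-- def compute_cost(columns):
--     m = len(columns)    # number of columns
--     n = len(columns[0]) # number of rows
--     result = 0
--     for i in range(n):
--         for j in range(m):
--             if columns[j][i] == '0':
--                 result = result + 1
--             else:
--                 break
--         for j in reversed(range(m)):
--             if columns[j][i] == '0':
--                 result = result + 1
--             else:
--                 break
--     return result
-- ===== SOURCE B (Python) =====
-- def _sweep(columns, n):
--     # column-major: alive[i] tracks whether row i has been all '0' so far;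
--     # each column adds the number of rows still alive after it.
--     result = 0
--     alive = [True] * n
--     for col in columns:
--         alive = [a and c == '0' for a, c in zip(alive, col)]
--         result += sum(alive)
--     return result
--
-- def compute_cost(columns):
--     n = len(columns[0])
--     return _sweep(columns, n) + _sweep(columns[::-1], n)
-- ===== Notes on version B (the rewrite author's own statement) =====
-- stated objective: alternative
-- what changed: B sweeps the columns column-major with a per-row boolean liveness vector, adding per column the number of rows whose prefix (resp. suffix, via a second sweep over the reversed column list) is still all '0'; A scans each row with two explicit break-loops.
-- outside the precondition, e.g. on compute_cost(['01', '1', '0y']): A returns 2, B returns 2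
import Mathlib
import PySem

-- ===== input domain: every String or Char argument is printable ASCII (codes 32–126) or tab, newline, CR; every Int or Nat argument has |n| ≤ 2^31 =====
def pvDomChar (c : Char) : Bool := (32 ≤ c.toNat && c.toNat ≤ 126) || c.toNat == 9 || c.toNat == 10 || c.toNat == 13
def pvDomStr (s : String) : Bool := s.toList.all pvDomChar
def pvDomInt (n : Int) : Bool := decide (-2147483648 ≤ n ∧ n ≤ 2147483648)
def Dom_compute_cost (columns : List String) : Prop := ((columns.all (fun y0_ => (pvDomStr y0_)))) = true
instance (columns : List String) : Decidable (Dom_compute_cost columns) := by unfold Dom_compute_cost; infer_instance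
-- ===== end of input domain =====

-- B replaces A's per-row break-loops by a column-major sweep with a per-row liveness vector; alternative algorithm, same cost.

-- ===== PORT A =====
-- inner 'for j … if col[j][i]=='0': +1 else break' loop; character access col[j][i] is
-- ported as toList.getD i ' ' — exact under Pre_, which guarantees i is in range.
def pvCountLead (cols : List String) (i : Nat) : Int :=
  match cols with
  | [] => 0
  | c :: rest => if c.toList.getD i ' ' = '0' then 1 + pvCountLead rest i else 0

def compute_cost (columns : List String) : Int :=
  let n := (columns.headD "").toList.length
  (List.range n).foldl
    (fun acc i => acc + pvCountLead columns i + pvCountLead columns.reverse i) 0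

-- ===== PORT B =====
-- _sweep: 'alive = [a and c=='0' for a,c in zip(alive, col)]; result += sum(alive)';
-- sum of Python booleans is ported as count of true.
def pvSweep (cols : List String) (n : Nat) : Int :=
  (cols.foldl
    (fun (st : List Bool × Int) col =>
      let alive := (st.1.zip col.toList).map (fun p => p.1 && p.2 == '0')
      (alive, st.2 + (alive.count true : Int)))
    (List.replicate n true, 0)).2

def compute_cost_alt (columns : List String) : Int :=
  let n := (columns.headD "").toList.length
  pvSweep columns n + pvSweep columns.reverse n

-- ===== PRECONDITION & SPEC =====
-- A raises IndexError on [] (columns[0]) and may raise when a later column is shorter than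
-- columns[0]; Pre_ requires every column to be at least as long as the first. This also
-- excludes some ragged inputs where A's breaks happen to avoid the short column and A
-- returns (B agrees there) — see the cite in claim.json.
def Pre_compute_cost (columns : List String) : Prop :=
  columns ≠ [] ∧ ∀ c ∈ columns, (columns.headD "").toList.length ≤ c.toList.length
instance (columns : List String) : Decidable (Pre_compute_cost columns) := by
  unfold Pre_compute_cost; infer_instance
def pvWitness_compute_cost : List String := ["00", "01"]
def Spec_compute_cost (columns : List String) (out : Int) : Prop := out = compute_cost_alt columns
instance (columns : List String) (out : Int) : Decidable (Spec_compute_cost columns out) := by unfold Spec_compute_cost; infer_instance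

-- ===== CLAIM (what is proved, stated in full; the proofs are below) =====
def Claim_equal_compute_cost : Prop := ∀ (columns : List String), Dom_compute_cost columns → Pre_compute_cost columns → Spec_compute_cost columns (compute_cost columns)

-- ===== LEMMAS AND PROOFS =====

-- A's break-loop counts exactly the takeWhile-'0' prefix of the row characters.
theorem pvCountLead_eq_takeWhile (cols : List String) (i : Nat) :
    pvCountLead cols i
      = (((cols.map (fun c => c.toList.getD i ' ')).takeWhile (· == '0')).length : Int) := by
  induction cols with
  | nil => simp [pvCountLead]
  | cons c rest ih =>
    simp only [pvCountLead, List.map_cons, List.takeWhile_cons, ih]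
    generalize c.toList.getD i ' ' = x
    by_cases h : x = '0' <;> simp [h] <;> omega

-- count of true in a mapped boolean list, as a 0/1 integer sum
theorem pv_count_true_map (l : List Nat) (g : Nat → Bool) :
    (((l.map g).count true : Nat) : Int)
      = (l.map (fun i => if g i then (1 : Int) else 0)).sum := by
  induction l with
  | nil => simp
  | cons x xs ih =>
    by_cases h : g x <;>
      simp [List.count_cons, h, ih] <;> omega

-- one zip-with-a-column step keeps the liveness vector in '(range n).map g' form
theorem pv_alive_step (n : Nat) (g : Nat → Bool) (ys : List Char) (hys : n ≤ ys.length) :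
    (((List.range n).map g).zip ys).map (fun p => p.1 && p.2 == '0')
      = (List.range n).map (fun i => g i && (ys.getD i ' ' == '0')) := by
  apply List.ext_getElem
  · simp [List.length_zip]; omega
  · intro i h1 h2
    have hi : i < n := by simpa using h2
    have hiy : i < ys.length := lt_of_lt_of_le hi hys
    simp [List.getElem_zip, List.getD_eq_getElem?_getD, List.getElem?_eq_getElem hiy,
      List.length_zip, hi]

-- one row's contribution of a single column step, combined with the remaining sweep
theorem pv_point (b : Bool) (x : Char) (l : List Char) :
    ((if b && (x == '0') then (1 : Int) else 0)
      + (if b && (x == '0') then ((l.takeWhile (· == '0')).length : Int) else 0))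
    = if b then (((x :: l).takeWhile (· == '0')).length : Int) else 0 := by
  cases b
  · simp
  · by_cases h : x = '0' <;> simp [List.takeWhile_cons, h] <;> omega

-- the column-major sweep, characterised row-wise
theorem pv_sweep_aux (cols : List String) (n : Nat)
    (h : ∀ c ∈ cols, n ≤ c.toList.length) (g : Nat → Bool) (acc : Int) :
    (cols.foldl
      (fun (st : List Bool × Int) col =>
        let alive := (st.1.zip col.toList).map (fun p => p.1 && p.2 == '0')
        (alive, st.2 + (alive.count true : Int)))
      ((List.range n).map g, acc)).2
    = acc + ((List.range n).map (fun i =>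
        if g i then (((cols.map (fun c => c.toList.getD i ' ')).takeWhile (· == '0')).length : Int)
        else 0)).sum := by
  induction cols generalizing g acc with
  | nil => simp
  | cons c rest ih =>
    have hc : n ≤ c.toList.length := h c (by simp)
    have hrest : ∀ x ∈ rest, n ≤ x.toList.length := fun x hx => h x (by simp [hx])
    clear h
    simp only [List.foldl_cons]
    rw [pv_alive_step n g c.toList hc,
      ih hrest (fun i => g i && (c.toList.getD i ' ' == '0')),
      pv_count_true_map, add_assoc, ← PySem.List.sum_map_add_int]
    congr 1
    apply congrArg List.sum
    apply List.map_congr_left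
    intro i _
    simp only [List.map_cons]
    exact pv_point (g i) (c.toList.getD i ' ') (rest.map (fun x => x.toList.getD i ' '))

theorem pv_sweep_eq (cols : List String) (n : Nat)
    (h : ∀ c ∈ cols, n ≤ c.toList.length) :
    pvSweep cols n
      = ((List.range n).map (fun i =>
          (((cols.map (fun c => c.toList.getD i ' ')).takeWhile (· == '0')).length : Int))).sum := by
  have hrep : (List.replicate n true) = (List.range n).map (fun _ => true) := by
    simp [List.map_const']
  unfold pvSweep
  rw [hrep, pv_sweep_aux cols n h (fun _ => true) 0]
  simp

-- ===== VERDICT (by name: the statement is the Claim_ definition above) =====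
theorem compute_cost_spec : Claim_equal_compute_cost := by
  intro columns _ hpre
  obtain ⟨-, hlen⟩ := hpre
  set n := (columns.headD "").toList.length with hn
  unfold Spec_compute_cost compute_cost compute_cost_alt
  simp only [← hn]
  have hbody :
      (fun (acc : Int) (i : Nat) => acc + pvCountLead columns i + pvCountLead columns.reverse i)
      = (fun (acc : Int) (i : Nat) =>
          acc + (pvCountLead columns i + pvCountLead columns.reverse i)) := by
    funext acc i; ring
  rw [hbody, PySem.List.foldl_add]
  have hrev : ∀ c ∈ columns.reverse, n ≤ c.toList.length := by
    intro c hc; exact hlen c (List.mem_reverse.mp hc)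
  rw [pv_sweep_eq columns n hlen, pv_sweep_eq columns.reverse n hrev]
  rw [zero_add]
  have hsum := PySem.List.sum_map_add_int (List.range n)
    (fun i => (((columns.map (fun c => c.toList.getD i ' ')).takeWhile (· == '0')).length : Int))
    (fun i => (((columns.reverse.map (fun c => c.toList.getD i ' ')).takeWhile (· == '0')).length : Int))
  simp only [pvCountLead_eq_takeWhile]
  exact hsum
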